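-- pv_equiv track=rewrite | github.com/bobbeross/rek | easy.py | kiedy
-- ===== SOURCE A (Python) =====
-- def kiedy(x, y):
--     long = 1000
--     day = 0
--     while long > 0:
--         long -= x
--         if long<0:
--             return day
--         long += y
--         day += 1
-- ===== SOURCE B (Python) =====
-- def kiedy(x, y):
--     if x > 1000:
--         return 0
--     return (1000 - x) // (x - y) + 1
-- ===== Notes on version B (the rewrite author's own statement) =====
-- stated objective: simpler
-- what changed: Replaced the day-by-day countdown loop with a closed-form ceiling-division formula: the answer is (1000-x)//(x-y)+1 (0 if x>1000).
-- outside the precondition, e.g. on kiedy(1000, 0): A returns None, B returns 1; on kiedy(0, -5): A returns None, B returns 201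
import Mathlib
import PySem

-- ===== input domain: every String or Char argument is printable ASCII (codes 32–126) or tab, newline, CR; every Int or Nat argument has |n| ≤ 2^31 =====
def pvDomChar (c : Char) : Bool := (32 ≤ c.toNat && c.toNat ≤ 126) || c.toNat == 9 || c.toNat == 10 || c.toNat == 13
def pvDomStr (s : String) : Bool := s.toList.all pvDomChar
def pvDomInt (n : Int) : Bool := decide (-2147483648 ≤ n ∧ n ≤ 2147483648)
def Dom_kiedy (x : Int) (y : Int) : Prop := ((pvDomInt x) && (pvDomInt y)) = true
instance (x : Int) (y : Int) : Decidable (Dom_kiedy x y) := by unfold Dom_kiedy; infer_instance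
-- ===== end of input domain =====

-- B replaces A's day-by-day countdown loop with a closed-form ceiling-division formula.


-- ===== PORT A =====
-- Literal port of A's while-loop.  The loop runs at most `long` iterations on every
-- input admitted by Pre_ (each step lowers `long` by x - y ≥ 1, or returns at once),
-- so fuel 1001 is enough for the initial long = 1000; the 0 returned on fuel
-- exhaustion and on the `while` exiting with long ≤ 0 (Python: None) is unreachable
-- under Pre_kiedy.
def kiedyLoop (x : Int) (y : Int) : Nat → Int → Int → Int
  | 0, _, _ => 0
  | f + 1, long, day =>
    if long > 0 then
      let l := long - x
      if l < 0 then day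
      else kiedyLoop x y f (l + y) (day + 1)
    else 0

def kiedy (x : Int) (y : Int) : Int := kiedyLoop x y 1001 1000 0

-- ===== PORT B =====
def kiedy_alt (x : Int) (y : Int) : Int :=
  if x > 1000 then 0
  else PySem.Int.floordiv (1000 - x) (x - y) + 1

-- ===== PRECONDITION & SPEC =====
-- Pre_ excludes exactly the inputs on which the Python A does not return an int:
-- it loops forever (x - y ≤ 0 with x ≤ 1000), or falls off the `while` returning
-- None (the countdown reaches a value ≤ 0 at the top of the loop before ever going
-- negative mid-step, which happens iff x ≤ 1000 and ¬(1 ≤ x ∧ x - y < x + (1000-x) % (x-y))).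
def Pre_kiedy (x : Int) (y : Int) : Prop :=
  x > 1000 ∨ (1 ≤ x ∧ y < x ∧ x - y < x + PySem.Int.mod (1000 - x) (x - y))
instance (x : Int) (y : Int) : Decidable (Pre_kiedy x y) := by unfold Pre_kiedy; infer_instance

def pvWitness_kiedy : Int × Int := (3, 1)

def Spec_kiedy (x : Int) (y : Int) (out : Int) : Prop := out = kiedy_alt x y
instance (x : Int) (y : Int) (out : Int) : Decidable (Spec_kiedy x y out) := by unfold Spec_kiedy; infer_instance

-- ===== CLAIM (what is proved, stated in full; the proofs are below) =====
def Claim_equal_kiedy : Prop := ∀ (x : Int) (y : Int), Dom_kiedy x y → Pre_kiedy x y → Spec_kiedy x y (kiedy x y)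

-- ===== LEMMAS AND PROOFS =====

-- Loop characterisation: as long as the "returns an int" invariant holds for the
-- current `long`, the loop computes day + ⌈max(long - x + 1, 0) / (x - y)⌉,
-- written with Int.ediv (the divisor x - y is positive whenever the else-branch runs).
lemma kiedyLoop_eq (f : Nat) : ∀ (x y long day : Int),
    0 < long → long ≤ (f : Int) →
    (long - x < 0 ∨ (1 ≤ x ∧ y < x ∧ x - y < x + (long - x) % (x - y))) →
    kiedyLoop x y f long day =
      day + (if long - x < 0 then 0 else (long - x) / (x - y) + 1) := by
  induction f with
  | zero => intro x y long day hpos hle _; exfalso; omega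
  | succ f ih =>
    intro x y long day hpos hle hinv
    rw [kiedyLoop]
    simp only [hpos, if_pos]
    by_cases hret : long - x < 0
    · simp [hret]
    · have hk : 0 < x - y := by
        rcases hinv with h | ⟨_, hy, _⟩
        · omega
        · omega
      rcases hinv with h | ⟨hx, hy, hmod⟩
      · omega
      have hlx : 0 ≤ long - x := by omega
      simp only [hret, if_false]
      -- the recursive call is on long' = long - (x - y)
      have harg : long - x + y = long - (x - y) := by ring
      -- long' is still positive: otherwise long ≤ x - y, so (long-x) % (x-y) = long - x,
      -- contradicting the invariant
      have hpos' : 0 < long - (x - y) := by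
        by_contra hle'
        have hsmall : long - x < x - y := by omega
        have : (long - x) % (x - y) = long - x := Int.emod_eq_of_lt hlx hsmall
        omega
      have hmod' : (long - (x - y) - x) % (x - y) = (long - x) % (x - y) := by
        have : long - (x - y) - x = (long - x) - (x - y) := by ring
        rw [this, Int.sub_emod_right]
      have hinv' : long - (x - y) - x < 0 ∨
          (1 ≤ x ∧ y < x ∧ x - y < x + (long - (x - y) - x) % (x - y)) := by
        by_cases h2 : long - (x - y) - x < 0
        · exact Or.inl h2
        · exact Or.inr ⟨hx, hy, by rw [hmod']; exact hmod⟩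
      rw [harg, ih x y (long - (x - y)) (day + 1) hpos' (by omega) hinv']
      by_cases h2 : long - (x - y) - x < 0
      · -- last step: 0 ≤ long - x < x - y, so the quotient is 0
        have hdiv : (long - x) / (x - y) = 0 :=
          Int.ediv_eq_zero_of_lt hlx (by omega)
        simp [h2, hdiv]
      · have hdiv : (long - (x - y) - x) / (x - y) = (long - x) / (x - y) - 1 := by
          have h3 : long - (x - y) - x = (long - x) + (-1) * (x - y) := by ring
          rw [h3, Int.add_mul_ediv_right _ _ (by omega : x - y ≠ 0)]; ring
        simp only [h2, if_false]
        rw [hdiv]; ring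

-- ===== VERDICT (by name: the statement is the Claim_ definition above) =====
theorem kiedy_spec : Claim_equal_kiedy := by
  intro x y _ hpre
  unfold Spec_kiedy kiedy kiedy_alt
  by_cases hbig : x > 1000
  · rw [kiedyLoop_eq 1001 x y 1000 0 (by omega) (by omega) (Or.inl (by omega))]
    simp [hbig, show (1000 : Int) - x < 0 by omega]
  · rcases hpre with h | ⟨hx, hy, hmod⟩
    · omega
    have hk : 0 < x - y := by omega
    rw [kiedyLoop_eq 1001 x y 1000 0 (by omega) (by omega)
        (Or.inr ⟨hx, hy, by rwa [← PySem.Int.mod_eq_emod_of_pos hk]⟩)]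
    rw [PySem.Int.floordiv_eq_ediv_of_pos hk]
    simp [hbig, show ¬((1000 : Int) - x < 0) by omega]
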